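-- pv_equiv track=rewrite | github.com/Durgeshj11/cosmic-backend | app/main.py | get_numerology_harmony
-- ===== SOURCE A (Python) =====
-- def get_numerology_harmony(name_a: str, name_b: str) -> int:
--     def calc_destiny(name):
--         val_map = {c: (i % 9) + 1 for i, c in enumerate("abcdefghijklmnopqrstuvwxyz")}
--         total = sum(val_map.get(char.lower(), 0) for char in name if char.isalpha())
--         while total > 9: total = sum(int(d) for d in str(total))
--         return total
--     d1, d2 = calc_destiny(name_a), calc_destiny(name_b)
--     diff = abs(d1 - d2)
--     return 98 if diff == 0 else 80 if diff in [2, 4, 6] else 40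
-- ===== SOURCE B (Python) =====
-- def get_numerology_harmony(name_a: str, name_b: str) -> int:
--     def calc_destiny(name):
--         total = sum((ord(c.lower()) - 97) % 9 + 1 for c in name if c.isalpha())
--         return 0 if total == 0 else 1 + (total - 1) % 9
--     d1, d2 = calc_destiny(name_a), calc_destiny(name_b)
--     diff = abs(d1 - d2)
--     return 98 if diff == 0 else 80 if diff in (2, 4, 6) else 40
-- ===== Notes on version B (the rewrite author's own statement) =====
-- stated objective: simpler
-- what changed: Replaced the 26-entry letter-value dict by the arithmetic (ord(c.lower())-97)%9+1 and the iterative while-loop digit re-summing by the closed-form digital root 1+(total-1)%9 (0 when total is 0).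
import Mathlib
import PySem

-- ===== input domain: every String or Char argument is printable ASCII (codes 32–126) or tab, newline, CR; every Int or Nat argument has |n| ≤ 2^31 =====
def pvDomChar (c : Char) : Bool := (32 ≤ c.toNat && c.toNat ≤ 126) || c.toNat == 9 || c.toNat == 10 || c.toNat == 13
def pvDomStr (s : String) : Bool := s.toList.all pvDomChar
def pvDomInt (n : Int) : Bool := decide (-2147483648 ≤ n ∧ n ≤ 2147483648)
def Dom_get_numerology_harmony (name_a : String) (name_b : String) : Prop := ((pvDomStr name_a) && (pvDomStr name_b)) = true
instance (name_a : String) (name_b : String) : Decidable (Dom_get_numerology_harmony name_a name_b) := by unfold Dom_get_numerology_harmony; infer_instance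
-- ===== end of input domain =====

-- B replaces A's letter-value dict and the iterative digit-resumming while-loop by the
-- closed-form digital root 1 + (total-1) % 9 (0 for empty totals); objective: simpler.

-- ===== PORT A =====
-- helpers the port's termination proof cites (statement and proof of the digit-sum bound)
-- int(d) for a single character d (exact: PySem.Int.ofChars?; never none on digits of str(total))
def pvCharVal (c : Char) : Int := (PySem.Int.ofChars? [c]).getD 0

-- sum(int(d) for d in str(total))
def pvDigitSum (t : Int) : Int := (((PySem.Int.toStr t).toList).map pvCharVal).sum

-- nat-level digit sum, used to bound pvDigitSum for termination of the while-loop port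
def pvNatDigitSum (n : Nat) : Nat :=
  if _h : n < 10 then n else n % 10 + pvNatDigitSum (n / 10)
decreasing_by omega

theorem pvCharVal_digitChar (d : Nat) (h : d < 10) : pvCharVal (Nat.digitChar d) = (d : Int) := by
  interval_cases d <;> decide

theorem pvToDigitsCore_sum : ∀ (fuel n : Nat) (acc : List Char), n < fuel →
    ((Nat.toDigitsCore 10 fuel n acc).map pvCharVal).sum
      = (pvNatDigitSum n : Int) + (acc.map pvCharVal).sum := by
  intro fuel
  induction fuel with
  | zero => intro n acc h; omega
  | succ f ih =>
    intro n acc h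
    rw [Nat.toDigitsCore]
    by_cases h10 : n / 10 = 0
    · have hn : n < 10 := by omega
      rw [if_pos h10]
      rw [pvNatDigitSum, dif_pos hn]
      simp only [List.map_cons, List.sum_cons, pvCharVal_digitChar (n % 10) (by omega)]
      omega
    · rw [if_neg h10]
      rw [ih (n / 10) _ (by omega)]
      conv_rhs => rw [pvNatDigitSum]
      rw [dif_neg (show ¬ n < 10 by omega)]
      simp only [List.map_cons, List.sum_cons, pvCharVal_digitChar (n % 10) (by omega)]
      push_cast
      ring

theorem pvDigitSum_eq (t : Int) (ht : 0 ≤ t) : pvDigitSum t = (pvNatDigitSum t.toNat : Int) := by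
  unfold pvDigitSum
  rw [PySem.Int.toList_toStr]
  unfold PySem.Int.toChars
  rw [if_neg (by omega)]
  unfold Nat.toDigits
  rw [pvToDigitsCore_sum _ _ _ (Nat.lt_succ_self _)]
  simp

theorem pvNatDigitSum_le : ∀ n : Nat, pvNatDigitSum n ≤ n := by
  intro n
  induction n using Nat.strong_induction_on with
  | _ n ih =>
    rw [pvNatDigitSum]
    split
    · omega
    · have := ih (n / 10) (by omega)
      omega

theorem pvDigitSum_toNat_lt (t : Int) (h : 9 < t) : (pvDigitSum t).toNat < t.toNat := by
  rw [pvDigitSum_eq t (by omega)]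
  have h10 : 10 ≤ t.toNat := by omega
  have h1 : pvNatDigitSum t.toNat < t.toNat := by
    rw [pvNatDigitSum]
    rw [dif_neg (by omega)]
    have := pvNatDigitSum_le (t.toNat / 10)
    omega
  omega

-- while total > 9: total = sum(int(d) for d in str(total))
def pvReduce (t : Int) : Int :=
  if h : 9 < t then pvReduce (pvDigitSum t) else t
termination_by t.toNat
decreasing_by exact pvDigitSum_toNat_lt t h

-- val_map = {c: (i % 9) + 1 for i, c in enumerate("abcdefghijklmnopqrstuvwxyz")}
def pvValMap : PySem.Dict Char Int :=
  (PySem.List.enumerate "abcdefghijklmnopqrstuvwxyz".toList).foldl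
    (fun d p => d.insert p.2 (PySem.Int.mod p.1 9 + 1)) PySem.Dict.empty

-- def calc_destiny(name): …
def pvCalcDestiny (name : String) : Int :=
  let total := name.toList.foldl
    (fun acc c => if PySem.Chars.isalpha c
      then acc + pvValMap.getD (PySem.Chars.lowerChar c) 0 else acc) 0
  pvReduce total

def get_numerology_harmony (name_a : String) (name_b : String) : Int :=
  let d1 := pvCalcDestiny name_a
  let d2 := pvCalcDestiny name_b
  let diff := |d1 - d2|
  if diff = 0 then 98 else if diff ∈ ([2, 4, 6] : List Int) then 80 else 40

-- ===== PORT B =====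
-- def calc_destiny(name): closed-form digital root of the letter sum
def pvCalcDestinyAlt (name : String) : Int :=
  let total := name.toList.foldl
    (fun acc c => if PySem.Chars.isalpha c
      then acc + (PySem.Int.mod (((PySem.Chars.lowerChar c).toNat : Int) - 97) 9 + 1) else acc) 0
  if total = 0 then 0 else 1 + PySem.Int.mod (total - 1) 9

def get_numerology_harmony_alt (name_a : String) (name_b : String) : Int :=
  let d1 := pvCalcDestinyAlt name_a
  let d2 := pvCalcDestinyAlt name_b
  let diff := |d1 - d2|
  if diff = 0 then 98 else if diff ∈ ([2, 4, 6] : List Int) then 80 else 40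

-- ===== PRECONDITION & SPEC =====
def Spec_get_numerology_harmony (name_a : String) (name_b : String) (out : Int) : Prop := out = get_numerology_harmony_alt name_a name_b
instance (name_a : String) (name_b : String) (out : Int) : Decidable (Spec_get_numerology_harmony name_a name_b out) := by unfold Spec_get_numerology_harmony; infer_instance

-- ===== CLAIM (what is proved, stated in full; the proofs are below) =====
def Claim_equal_get_numerology_harmony : Prop := ∀ (name_a : String) (name_b : String), Dom_get_numerology_harmony name_a name_b → Spec_get_numerology_harmony name_a name_b (get_numerology_harmony name_a name_b)

-- ===== LEMMAS AND PROOFS =====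

theorem pvMod9 (a : Int) : PySem.Int.mod a 9 = a % 9 := by
  show a.fmod 9 = a % 9
  rw [Int.fmod_eq_emod]
  norm_num

-- per-character agreement of A's dict value and B's arithmetic value, on ASCII
theorem pvStep_eq_fin : ∀ n : Fin 127,
    (if PySem.Chars.isalpha (Char.ofNat n.val)
      then pvValMap.getD (PySem.Chars.lowerChar (Char.ofNat n.val)) 0 else 0)
    = (if PySem.Chars.isalpha (Char.ofNat n.val)
      then PySem.Int.mod (((PySem.Chars.lowerChar (Char.ofNat n.val)).toNat : Int) - 97) 9 + 1 else 0) := by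
  set_option maxRecDepth 10000 in decide

theorem pvStep_eq (c : Char) (h : pvDomChar c = true) :
    (if PySem.Chars.isalpha c then pvValMap.getD (PySem.Chars.lowerChar c) 0 else 0)
    = (if PySem.Chars.isalpha c
      then PySem.Int.mod (((PySem.Chars.lowerChar c).toNat : Int) - 97) 9 + 1 else 0) := by
  have hlt : c.toNat < 127 := by
    simp [pvDomChar] at h
    omega
  have := pvStep_eq_fin ⟨c.toNat, hlt⟩
  simpa [Char.ofNat_toNat] using this

theorem pvTotal_eq (name : String) (h : pvDomStr name = true) :
    name.toList.foldl (fun acc c => if PySem.Chars.isalpha c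
      then acc + pvValMap.getD (PySem.Chars.lowerChar c) 0 else acc) 0
    = name.toList.foldl (fun acc c => if PySem.Chars.isalpha c
      then acc + (PySem.Int.mod (((PySem.Chars.lowerChar c).toNat : Int) - 97) 9 + 1) else acc) 0 := by
  apply PySem.List.foldl_congr_mem
  intro acc c hc
  have hd : pvDomChar c = true := by
    simp [pvDomStr, List.all_eq_true] at h
    exact h c hc
  have := pvStep_eq c hd
  by_cases ha : PySem.Chars.isalpha c <;> simp [ha] at this ⊢
  omega

-- B's per-letter value is nonnegative, so B's total is ≥ the starting accumulator
theorem pvTotalAlt_nonneg (l : List Char) : ∀ acc : Int, acc ≤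
    l.foldl (fun acc c => if PySem.Chars.isalpha c
      then acc + (PySem.Int.mod (((PySem.Chars.lowerChar c).toNat : Int) - 97) 9 + 1) else acc) acc := by
  induction l with
  | nil => intro acc; simp
  | cons c t ih =>
    intro acc
    simp only [List.foldl_cons]
    by_cases ha : PySem.Chars.isalpha c
    · simp only [ha, if_true]
      refine le_trans ?_ (ih _)
      have := Int.emod_nonneg (((PySem.Chars.lowerChar c).toNat : Int) - 97) (by norm_num : (9:Int) ≠ 0)
      rw [pvMod9]
      omega
    · simp only [ha]
      exact ih acc

theorem pvNatDigitSum_mod9 : ∀ n : Nat, pvNatDigitSum n % 9 = n % 9 := by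
  intro n
  induction n using Nat.strong_induction_on with
  | _ n ih =>
    rw [pvNatDigitSum]
    split
    · rfl
    · have := ih (n / 10) (by omega)
      omega

theorem pvNatDigitSum_pos (n : Nat) (_h : 1 ≤ n) : 1 ≤ pvNatDigitSum n := by
  induction n using Nat.strong_induction_on with
  | _ n ih =>
    rw [pvNatDigitSum]
    split
    · omega
    · have := ih (n / 10) (by omega) (by omega)
      omega

theorem pvReduce_eq_natCast : ∀ n : Nat,
    pvReduce (n : Int) = if (n : Int) = 0 then 0 else 1 + ((n : Int) - 1) % 9 := by
  intro n
  induction n using Nat.strong_induction_on with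
  | _ n ih =>
    rw [pvReduce]
    by_cases h : 9 < (n : Int)
    · rw [dif_pos h]
      rw [pvDigitSum_eq _ (by omega)]
      rw [Int.toNat_natCast]
      rw [ih (pvNatDigitSum n) (by
        have := pvNatDigitSum_le (n / 10)
        rw [pvNatDigitSum]
        rw [dif_neg (by omega)]
        omega)]
      have hm : pvNatDigitSum n % 9 = n % 9 := pvNatDigitSum_mod9 n
      have hp : 1 ≤ pvNatDigitSum n := pvNatDigitSum_pos n (by omega)
      zify at hm hp
      split_ifs <;> omega
    · rw [dif_neg h]
      split_ifs <;> omega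

theorem pvReduce_eq (t : Int) (h : 0 ≤ t) :
    pvReduce t = if t = 0 then 0 else 1 + (t - 1) % 9 := by
  have : t = ((t.toNat : Nat) : Int) := by omega
  rw [this, pvReduce_eq_natCast]

theorem pvDestiny_eq (name : String) (h : pvDomStr name = true) :
    pvCalcDestiny name = pvCalcDestinyAlt name := by
  unfold pvCalcDestiny pvCalcDestinyAlt
  rw [pvTotal_eq name h]
  set total := name.toList.foldl (fun acc c => if PySem.Chars.isalpha c
      then acc + (PySem.Int.mod (((PySem.Chars.lowerChar c).toNat : Int) - 97) 9 + 1) else acc) 0 with ht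
  have h0 : (0 : Int) ≤ total := pvTotalAlt_nonneg name.toList 0
  rw [pvReduce_eq total h0]
  simp only [pvMod9]

-- ===== VERDICT (by name: the statement is the Claim_ definition above) =====
theorem get_numerology_harmony_spec : Claim_equal_get_numerology_harmony := by
  intro name_a name_b hdom
  unfold Spec_get_numerology_harmony
  unfold Dom_get_numerology_harmony at hdom
  simp only [Bool.and_eq_true] at hdom
  unfold get_numerology_harmony get_numerology_harmony_alt
  rw [pvDestiny_eq name_a hdom.1, pvDestiny_eq name_b hdom.2]
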